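-- pv_equiv track=rewrite | github.com/anoopkverma/Mathematical-Expression-Evaluator | app_calculator/views.py | check_nondigit
-- ===== SOURCE A (Python) =====
-- def isoperator(c):
--     if c=='+' or c=='-' or c=='*' or c=='/':
--         return True
--     else:
--         return False
--
-- def check_nondigit(st):
--     flag=False
--     for c in st:
--         if isoperator(c) or (c>='0' and c<='9') or c=='(' or c==')':
--             continue
--         else:
--             flag=True
--     return flag
-- ===== SOURCE B (Python) =====
-- ALLOWED = '0123456789+-*/()'
--
-- def check_nondigit(st):
--     # 16 staged passes: count how many characters of st are allowed
--     # (the allowed characters are pairwise distinct, so the counts add up),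
--     # and compare with the total length.
--     return sum(st.count(a) for a in ALLOWED) != len(st)
-- ===== Notes on version B (the rewrite author's own statement) =====
-- stated objective: faster
-- what changed: Instead of scanning the string once with a per-character flag, B iterates over the 16-character allowed alphabet, counts the occurrences of each allowed character with st.count, and reports True iff the counts do not sum to len(st).
import Mathlib
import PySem

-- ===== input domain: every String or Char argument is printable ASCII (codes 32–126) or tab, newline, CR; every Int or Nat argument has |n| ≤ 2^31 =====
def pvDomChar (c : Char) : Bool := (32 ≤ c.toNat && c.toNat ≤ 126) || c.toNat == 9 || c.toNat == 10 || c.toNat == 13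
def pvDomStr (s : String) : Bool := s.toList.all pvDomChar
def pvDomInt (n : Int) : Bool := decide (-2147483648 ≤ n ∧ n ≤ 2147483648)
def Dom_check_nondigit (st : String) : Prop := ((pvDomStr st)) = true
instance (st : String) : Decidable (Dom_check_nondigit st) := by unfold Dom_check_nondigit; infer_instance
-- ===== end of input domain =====

-- B replaces A's per-character flag loop by 16 staged counting passes (one st.count per allowed character, summed and compared with len(st)); a timing run measured B faster (C-level count passes vs a Python-level loop).


-- ===== PORT A =====
def isoperator (c : Char) : Bool :=
  if c == '+' || c == '-' || c == '*' || c == '/' then true else false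

def check_nondigit (st : String) : Bool :=
  st.toList.foldl (fun flag c =>
    if isoperator c || (c ≥ '0' && c ≤ '9') || c == '(' || c == ')' then flag
    else true) false

-- ===== PORT B =====
def pvAllowed : List Char := "0123456789+-*/()".toList

def check_nondigit_alt (st : String) : Bool :=
  decide ((pvAllowed.map (fun a => PySem.Str.count st (String.ofList [a]))).sum ≠ PySem.Str.len st)

-- ===== PRECONDITION & SPEC =====
def Spec_check_nondigit (st : String) (out : Bool) : Prop := out = check_nondigit_alt st
instance (st : String) (out : Bool) : Decidable (Spec_check_nondigit st out) := by unfold Spec_check_nondigit; infer_instance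

-- ===== CLAIM (what is proved, stated in full; the proofs are below) =====
def Claim_equal_check_nondigit : Prop := ∀ (st : String), Dom_check_nondigit st → Spec_check_nondigit st (check_nondigit st)

-- ===== LEMMAS AND PROOFS =====

-- A's "allowed" test, named for the proofs
def pvCond (c : Char) : Bool :=
  isoperator c || (c ≥ '0' && c ≤ '9') || c == '(' || c == ')'

-- A's loop keeps the flag on allowed chars and sets it on others: it is an `any`.
theorem pvFoldlAny (l : List Char) (b : Bool) :
    l.foldl (fun flag c => if pvCond c then flag else true) b
      = (b || l.any (fun c => !pvCond c)) := by
  induction l generalizing b with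
  | nil => simp
  | cons c l ih =>
    simp only [List.foldl_cons, List.any_cons, ih]
    by_cases h : pvCond c = true <;> simp [h]

theorem pvCharEq (c d : Char) : c = d ↔ c.toNat = d.toNat :=
  ⟨fun h => h ▸ rfl, fun h => Char.ext (UInt32.toNat_inj.mp h)⟩

-- membership in B's allowed alphabet is exactly A's per-character test
theorem pvMemAllowed (c : Char) : (c ∈ pvAllowed) ↔ pvCond c = true := by
  rw [show pvAllowed
        = ['0','1','2','3','4','5','6','7','8','9','+','-','*','/','(',')'] from by decide]
  constructor
  · intro h
    simp only [List.mem_cons, List.not_mem_nil, or_false] at h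
    rcases h with h|h|h|h|h|h|h|h|h|h|h|h|h|h|h|h <;> subst h <;> decide
  · intro h
    simp [pvCond, isoperator] at h
    rcases h with ((hop | hd) | hp) | hp
    · simp only [or_assoc] at hop
      rcases hop with h|h|h|h <;> subst h <;> decide
    · obtain ⟨h1, h2⟩ := hd
      have h10 : c.toNat = 48 ∨ c.toNat = 49 ∨ c.toNat = 50 ∨ c.toNat = 51 ∨ c.toNat = 52 ∨
          c.toNat = 53 ∨ c.toNat = 54 ∨ c.toNat = 55 ∨ c.toNat = 56 ∨ c.toNat = 57 := by
        have : 48 ≤ c.toNat ∧ c.toNat ≤ 57 := ⟨h1, h2⟩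
        omega
      rcases h10 with h|h|h|h|h|h|h|h|h|h
      · rw [(pvCharEq c '0').mpr (h.trans (by decide))]; decide
      · rw [(pvCharEq c '1').mpr (h.trans (by decide))]; decide
      · rw [(pvCharEq c '2').mpr (h.trans (by decide))]; decide
      · rw [(pvCharEq c '3').mpr (h.trans (by decide))]; decide
      · rw [(pvCharEq c '4').mpr (h.trans (by decide))]; decide
      · rw [(pvCharEq c '5').mpr (h.trans (by decide))]; decide
      · rw [(pvCharEq c '6').mpr (h.trans (by decide))]; decide
      · rw [(pvCharEq c '7').mpr (h.trans (by decide))]; decide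
      · rw [(pvCharEq c '8').mpr (h.trans (by decide))]; decide
      · rw [(pvCharEq c '9').mpr (h.trans (by decide))]; decide
    · subst hp; decide
    · subst hp; decide

-- PySem.Chars.count with a single-character needle is List.count (fuel induction)
theorem pvCountGo (c : Char) (fuel : Nat) (l : List Char) (acc : Nat) (h : l.length ≤ fuel) :
    PySem.Chars.count.go [c] fuel l acc = acc + l.count c := by
  induction fuel generalizing l acc with
  | zero =>
    have : l = [] := List.eq_nil_of_length_eq_zero (Nat.le_zero.mp h)
    subst this; simp [PySem.Chars.count.go]
  | succ n ih =>
    cases l with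
    | nil => simp [PySem.Chars.count.go]
    | cons x t =>
      simp only [PySem.Chars.count.go]
      by_cases hx : c = x
      · subst hx
        simp only [List.isPrefixOf, BEq.rfl, Bool.true_and, if_pos]
        rw [ih _ _ (by simpa using Nat.le_of_succ_le_succ h)]
        simp
        omega
      · have : [c].isPrefixOf (x :: t) = false := by simp [List.isPrefixOf, hx]
        rw [this]
        simp only [Bool.false_eq_true, if_false]
        rw [ih _ _ (by simpa using Nat.le_of_succ_le_succ h)]
        simp [List.count_cons]
        exact fun he => hx he.symm

theorem pvCountSingle (s : List Char) (c : Char) :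
    PySem.Chars.count s [c] = s.count c := by
  simp [PySem.Chars.count, pvCountGo c s.length s 0 le_rfl]

-- a 0/1 indicator sum is a countP
theorem pvSumInd (c : Char) (L : List Char) :
    (L.map (fun a => if a == c then (1 : Nat) else 0)).sum = L.countP (fun a => a == c) := by
  induction L with
  | nil => simp
  | cons x L ih =>
    rw [List.map_cons, List.sum_cons, List.countP_cons, ih]
    cases x == c
    · simp
    · simp [Nat.add_comm]

-- the 16 counts add up to the number of allowed characters of l
theorem pvSumCounts (l : List Char) :
    (pvAllowed.map (fun a => l.count a)).sum = l.countP (fun c => decide (c ∈ pvAllowed)) := by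
  induction l with
  | nil => simp [List.count_nil]
  | cons c t ih =>
    have hsplit : (pvAllowed.map (fun a => (c :: t).count a)).sum
        = (pvAllowed.map (fun a => t.count a)).sum + pvAllowed.count c := by
      simp only [List.count_cons]
      rw [show (fun a => t.count a + if c == a then 1 else 0)
            = (fun a => t.count a + (if a == c then 1 else 0)) from by
          funext a; by_cases h : a = c <;> simp [h, BEq.comm]]
      rw [List.sum_map_add]
      have h2 : (pvAllowed.map (fun a => if a == c then (1 : Nat) else 0)).sum
          = pvAllowed.count c := by
        rw [List.count_eq_countP]; exact pvSumInd c pvAllowed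
      rw [h2]
    rw [hsplit, ih]
    have hc : pvAllowed.count c = if c ∈ pvAllowed then 1 else 0 := by
      by_cases h : c ∈ pvAllowed
      · simp only [h, if_true]
        rw [show pvAllowed
              = ['0','1','2','3','4','5','6','7','8','9','+','-','*','/','(',')'] from by
            decide] at h ⊢
        simp only [List.mem_cons, List.not_mem_nil, or_false] at h
        rcases h with h|h|h|h|h|h|h|h|h|h|h|h|h|h|h|h <;> subst h <;> decide
      · simp [h, List.count_eq_zero.mpr h]
    rw [hc, List.countP_cons]
    by_cases h : c ∈ pvAllowed <;> simp [h]

theorem check_nondigit_eq (st : String) : check_nondigit st = check_nondigit_alt st := by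
  unfold check_nondigit check_nondigit_alt
  rw [show (fun flag c => if isoperator c || (c ≥ '0' && c ≤ '9') || c == '(' || c == ')'
        then flag else true) = (fun flag c => if pvCond c then flag else true) from rfl,
    pvFoldlAny]
  have hcnt : ∀ a : Char, PySem.Str.count st (String.ofList [a]) = st.toList.count a := by
    intro a
    rw [show PySem.Str.count st (String.ofList [a]) = PySem.Chars.count st.toList [a] from by
      simp [PySem.Str.count]]
    exact pvCountSingle _ _
  simp only [hcnt]
  rw [pvSumCounts]
  rw [List.countP_congr (q := fun c => pvCond c)
    (fun c _ => by simpa [decide_eq_true_eq] using pvMemAllowed c)]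
  have hlen : PySem.Str.len st = st.toList.length := by simp [PySem.Str.len]
  rw [hlen]
  set l := st.toList
  simp only [Bool.false_or]
  rcases Bool.eq_false_or_eq_true (l.all (fun c => pvCond c)) with hall | hall
  swap
  · obtain ⟨c, hc, hf⟩ : ∃ c ∈ l, ¬ pvCond c = true := by
      simpa [List.all_eq_true] using (List.all_eq_false.mp hall)
    have h1 : l.any (fun c => !pvCond c) = true :=
      List.any_eq_true.mpr ⟨c, hc, by simp [hf]⟩
    have h2 : l.countP (fun c => pvCond c) ≠ l.length := by
      intro he; exact hf ((List.countP_eq_length).mp he c hc)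
    simp [h1, h2]
  · have h2 : l.countP (fun c => pvCond c) = l.length :=
      (List.countP_eq_length).mpr (List.all_eq_true.mp hall)
    have h1 : l.any (fun c => !pvCond c) = false :=
      List.any_eq_false.mpr (fun c hc => by simp [List.all_eq_true.mp hall c hc])
    simp [h1, h2]

-- ===== VERDICT (by name: the statement is the Claim_ definition above) =====
theorem check_nondigit_spec : Claim_equal_check_nondigit := by
  intro st _
  unfold Spec_check_nondigit
  exact check_nondigit_eq st
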